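-- pv_equiv track=rewrite | github.com/yuls12/Algorithm-Programmers | Level 1/[2022 KAKAO BLIND] 신고 결과 받기/Solution.py | solution
-- ===== SOURCE A (Python) =====
-- from collections import defaultdict
--
-- def solution(id_list, report, k):
--     answer = list()
--     count = defaultdict(int)   # 몇번 신고했는지
--     user = defaultdict(set)  # 신고 리스트
--     # 누가 누구를 신고했는지, 산고당한 횟수 세기
--     for r in report:
--         a, b = r.split()  # 누가 누구를 신고했는지 나누기
--         if b not in user[a]:   # 같은 사람이 1번 이상 신고 x
--             user[a].add(b)
--             count[b] += 1  # 신고당한 수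
--
--     # 자신이 신고한 사람이 k번 이상이면 처리된 횟수 + 1
--     for id in id_list:
--         result = 0
--         for u in user[id]:
--             if count[u] >= k:
--                 result += 1
--         answer.append(result)
--     return answer
-- ===== SOURCE B (Python) =====
-- def solution(id_list, report, k):
--     # Sort the deduplicated (reportee, reporter) pairs and sweep the contiguous
--     # groups per reportee: a group of size >= k bans that reportee, so each
--     # reporter in the group gets one result point.
--     pairs = []
--     for r in report:
--         a, b = r.split()
--         pairs.append((b, a))
--     pairs = sorted(dict.fromkeys(pairs))
--     tally = {}
--     cur = None
--     group = []
--     for b, a in pairs: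
--         if b != cur:
--             if cur is not None and len(group) >= k:
--                 for x in group:
--                     tally[x] = tally.get(x, 0) + 1
--             cur = b
--             group = [a]
--         else:
--             group.append(a)
--     if cur is not None and len(group) >= k:
--         for x in group:
--             tally[x] = tally.get(x, 0) + 1
--     return [tally.get(i, 0) for i in id_list]
-- ===== Notes on version B (the rewrite author's own statement) =====
-- stated objective: alternative
-- what changed: B replaces A's per-reporter sets plus per-id nested scan with a sort-then-sweep: it sorts the deduplicated (reportee, reporter) pairs and makes one linear sweep over the contiguous reportee groups, banning a group of size >= k and crediting its reporters in a tally read off per id.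
import Mathlib
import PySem

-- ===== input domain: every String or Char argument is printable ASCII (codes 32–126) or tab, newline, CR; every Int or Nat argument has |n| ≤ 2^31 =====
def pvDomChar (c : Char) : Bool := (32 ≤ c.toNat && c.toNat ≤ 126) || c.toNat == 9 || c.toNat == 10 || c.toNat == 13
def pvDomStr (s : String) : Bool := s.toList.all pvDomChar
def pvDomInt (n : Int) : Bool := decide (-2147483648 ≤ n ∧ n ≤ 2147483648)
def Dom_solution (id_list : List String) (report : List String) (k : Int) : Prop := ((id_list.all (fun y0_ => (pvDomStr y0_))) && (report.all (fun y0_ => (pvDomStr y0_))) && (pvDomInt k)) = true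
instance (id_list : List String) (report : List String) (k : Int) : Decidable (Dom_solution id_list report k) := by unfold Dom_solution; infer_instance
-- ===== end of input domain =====

-- B replaces A's per-reporter sets plus per-id nested scan with a sort-then-sweep over
-- the deduplicated (reportee, reporter) pairs (objective: alternative algorithm).

-- ===== PORT A =====
-- one iteration of A's first loop: split the line, dedup via user[a], count the reportee
def stepA (st : PySem.Dict String (PySem.Set String) × PySem.Dict String Int) (r : String) :
    PySem.Dict String (PySem.Set String) × PySem.Dict String Int :=
  match PySem.Str.split₀ r with
  | [a, b] =>
    let s := st.1.getD a []
    if s.contains b then st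
    else (st.1.insert a (PySem.Set.add s b), st.2.modify b 0 (· + 1))
  | _ => st  -- unreachable under Pre_solution (Python raises ValueError on unpacking)

def solution (id_list : List String) (report : List String) (k : Int) : List Int :=
  let st := report.foldl stepA (PySem.Dict.empty, PySem.Dict.empty)
  id_list.map (fun id =>
    (st.1.getD id []).foldl (fun result u => if st.2.getD u 0 ≥ k then result + 1 else result) (0 : Int))

-- ===== PORT B =====
-- one iteration of B's sweep over the sorted pairs: same reportee extends the group,
-- a new reportee flushes the finished group into the tally (when it has ≥ k reporters)
def sweepStep (k : Int) (st : Option String × List String × PySem.Dict String Int)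
    (p : String × String) : Option String × List String × PySem.Dict String Int :=
  match st with
  | (none, _, t) => (some p.1, [p.2], t)
  | (some c, g, t) =>
    if p.1 = c then (some c, g ++ [p.2], t)
    else (some p.1, [p.2],
      if (g.length : Int) ≥ k then g.foldl (fun d x => d.modify x 0 (· + 1)) t else t)

-- Source B's trailing flush of the last group
def sweepFinish (k : Int) (st : Option String × List String × PySem.Dict String Int) :
    PySem.Dict String Int :=
  match st with
  | (none, _, t) => t
  | (some _, g, t) =>
    if (g.length : Int) ≥ k then g.foldl (fun d x => d.modify x 0 (· + 1)) t else t

def solution_alt (id_list : List String) (report : List String) (k : Int) : List Int :=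
  let pairs := report.foldl (fun acc r =>
    acc ++ (match PySem.Str.split₀ r with | [a, b] => [(b, a)] | _ => [])) []
    -- the match default is unreachable under Pre_solution (ValueError in Python)
  let spairs := PySem.List.sorted2 (PySem.List.dedup pairs) Prod.fst Prod.snd
  let tally := sweepFinish k (spairs.foldl (sweepStep k) (none, [], PySem.Dict.empty))
  id_list.map (fun i => tally.getD i 0)

-- ===== PRECONDITION & SPEC =====
-- Pre_ excludes exactly the reports that do not split into two whitespace-separated
-- tokens, where 'a, b = r.split()' raises ValueError (in A and in B alike).
def Pre_solution (id_list : List String) (report : List String) (k : Int) : Prop :=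
  ∀ r ∈ report, (PySem.Str.split₀ r).length = 2
instance (id_list : List String) (report : List String) (k : Int) : Decidable (Pre_solution id_list report k) := by unfold Pre_solution; infer_instance

def pvWitness_solution : List String × List String × Int :=
  (["muzi", "frodo", "apeach", "neo"], ["muzi frodo", "apeach frodo", "frodo neo", "muzi neo", "apeach muzi"], 2)

def Spec_solution (id_list : List String) (report : List String) (k : Int) (out : List Int) : Prop := out = solution_alt id_list report k
instance (id_list : List String) (report : List String) (k : Int) (out : List Int) : Decidable (Spec_solution id_list report k out) := by unfold Spec_solution; infer_instance

-- ===== CLAIM (what is proved, stated in full; the proofs are below) =====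
def Claim_equal_solution : Prop := ∀ (id_list : List String) (report : List String) (k : Int), Dom_solution id_list report k → Pre_solution id_list report k → Spec_solution id_list report k (solution id_list report k)

-- ===== LEMMAS AND PROOFS =====

-- the (reporter, reportee) pairs of the report lines, in order, with multiplicity
def pairsOf (report : List String) : List (String × String) :=
  report.flatMap (fun r => match PySem.Str.split₀ r with | [a, b] => [(a, b)] | _ => [])

-- proof-side ghost: first-occurrence dedup of the pairs, with the reportee counter
def stepG (st : PySem.Set (String × String) × PySem.Dict String Int) (r : String) :
    PySem.Set (String × String) × PySem.Dict String Int :=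
  match PySem.Str.split₀ r with
  | [a, b] =>
    if st.1.contains (a, b) then st
    else (PySem.Set.add st.1 (a, b), st.2.modify b 0 (· + 1))
  | _ => st

-- Python's tuple order on the pairs
def lexlt (p q : String × String) : Prop := p.1 < q.1 ∨ (p.1 = q.1 ∧ p.2 < q.2)

-- put each report line in the exploitable shape
lemma split_two_shape (r : String) (h : (PySem.Str.split₀ r).length = 2) :
    ∃ a b, PySem.Str.split₀ r = [a, b] := by
  match hs : PySem.Str.split₀ r with
  | [a, b] => exact ⟨a, b, rfl⟩
  | [] | [_] | _ :: _ :: _ :: _ => simp [hs] at h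

-- the coupled loop invariant relating A's (user, count) to the ghost (seen, count)
lemma loop_rel (rep : List String) :
    ∀ (user : PySem.Dict String (PySem.Set String)) (count : PySem.Dict String Int)
      (seen : PySem.Set (String × String)),
    (∀ r ∈ rep, (PySem.Str.split₀ r).length = 2) →
    (∀ a, (seen.filter (fun p => p.1 == a)).map (·.2) = user.getD a []) →
    (rep.foldl stepG (seen, count)).2 = (rep.foldl stepA (user, count)).2 ∧
    (∀ a, ((rep.foldl stepG (seen, count)).1.filter (fun p => p.1 == a)).map (·.2)
        = (rep.foldl stepA (user, count)).1.getD a []) := by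
  induction rep with
  | nil => intro user count seen _ h2; exact ⟨rfl, h2⟩
  | cons r rep ih =>
    intro user count seen h1 h2
    obtain ⟨a, b, hs⟩ := split_two_shape r (h1 r (by simp))
    have hmem : b ∈ user.getD a [] ↔ (a, b) ∈ seen := by
      rw [← h2 a]
      simp only [List.mem_map, List.mem_filter]
      constructor
      · rintro ⟨p, ⟨hp, hpa⟩, hpb⟩
        have : p = (a, b) := by
          cases p; simp_all [beq_iff_eq]
        exact this ▸ hp
      · intro hp; exact ⟨(a, b), ⟨hp, by simp⟩, rfl⟩
    by_cases hc : (a, b) ∈ seen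
    · have hA : stepA (user, count) r = (user, count) := by
        simp [stepA, hs, hmem.mpr hc]
      have hB : stepG (seen, count) r = (seen, count) := by
        simp [stepG, hs, hc]
      simp only [List.foldl_cons, hA, hB]
      exact ih user count seen (fun r hr => h1 r (by simp [hr])) h2
    · have hbs : b ∉ user.getD a [] := fun h => hc (hmem.mp h)
      have hA : stepA (user, count) r
          = (user.insert a (PySem.Set.add (user.getD a []) b), count.modify b 0 (· + 1)) := by
        simp [stepA, hs, hbs]
      have hB : stepG (seen, count) r
          = (PySem.Set.add seen (a, b), count.modify b 0 (· + 1)) := by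
        simp [stepG, hs, hc]
      simp only [List.foldl_cons, hA, hB]
      apply ih
      · exact fun r hr => h1 r (by simp [hr])
      · intro a'
        rw [PySem.Set.add_of_not_mem hc, PySem.Dict.getD_insert, List.filter_append, List.map_append]
        by_cases ha : a' = a
        · subst ha
          rw [PySem.Set.add_of_not_mem hbs, ← h2 a']
          simp
        · simp [Ne.symm ha, h2 a', beq_iff_eq, ha]

-- the ghost's dedup list is exactly the first-occurrence dedup of the pairs
lemma ghost_seen (rep : List String) :
    ∀ (seen : PySem.Set (String × String)) (count : PySem.Dict String Int),
    (∀ r ∈ rep, (PySem.Str.split₀ r).length = 2) →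
    (rep.foldl stepG (seen, count)).1 = PySem.Set.update seen (pairsOf rep) := by
  induction rep with
  | nil => intro seen count _; simp [pairsOf, PySem.Set.update]
  | cons r rep ih =>
    intro seen count h1
    obtain ⟨a, b, hs⟩ := split_two_shape r (h1 r (by simp))
    have hp : pairsOf (r :: rep) = (a, b) :: pairsOf rep := by
      simp [pairsOf, hs]
    rw [hp]
    by_cases hc : (a, b) ∈ seen
    · have hB : stepG (seen, count) r = (seen, count) := by simp [stepG, hs, hc]
      have hadd : PySem.Set.add seen (a, b) = seen := PySem.Set.add_of_mem hc
      simp only [List.foldl_cons, hB, PySem.Set.update, hadd]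
      exact ih seen count (fun r hr => h1 r (by simp [hr]))
    · have hB : stepG (seen, count) r
          = (PySem.Set.add seen (a, b), count.modify b 0 (· + 1)) := by
        simp [stepG, hs, hc]
      simp only [List.foldl_cons, hB, PySem.Set.update]
      exact ih _ _ (fun r hr => h1 r (by simp [hr]))

-- the ghost's counter counts, per reportee, the dedup-list pairs naming it
lemma ghost_count (rep : List String) :
    ∀ (seen : PySem.Set (String × String)) (count : PySem.Dict String Int),
    (∀ r ∈ rep, (PySem.Str.split₀ r).length = 2) →
    (∀ u, count.getD u 0 = (seen.countP (fun p => p.2 == u) : Int)) →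
    ∀ u, (rep.foldl stepG (seen, count)).2.getD u 0
        = (((rep.foldl stepG (seen, count)).1).countP (fun p => p.2 == u) : Int) := by
  induction rep with
  | nil => intro seen count _ h; exact h
  | cons r rep ih =>
    intro seen count h1 h
    obtain ⟨a, b, hs⟩ := split_two_shape r (h1 r (by simp))
    by_cases hc : (a, b) ∈ seen
    · have hB : stepG (seen, count) r = (seen, count) := by simp [stepG, hs, hc]
      simp only [List.foldl_cons, hB]
      exact ih seen count (fun r hr => h1 r (by simp [hr])) h
    · have hB : stepG (seen, count) r
          = (PySem.Set.add seen (a, b), count.modify b 0 (· + 1)) := by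
        simp [stepG, hs, hc]
      simp only [List.foldl_cons, hB]
      apply ih _ _ (fun r hr => h1 r (by simp [hr]))
      intro u
      rw [PySem.Set.add_of_not_mem hc, List.countP_append,
        PySem.Dict.getD_modify]
      by_cases hub : u = b
      · subst hub
        simp [h u]
      · simp [hub, h u, Ne.symm hub]

-- A's inner per-id scan, rewritten as a countP over the pairs with that reporter
lemma A_entry (user : PySem.Dict String (PySem.Set String)) (count : PySem.Dict String Int)
    (seen : PySem.Set (String × String)) (k : Int) (id : String)
    (h2 : (seen.filter (fun p => p.1 == id)).map (·.2) = user.getD id []) :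
    (user.getD id []).foldl (fun result u => if count.getD u 0 ≥ k then result + 1 else result) (0 : Int)
      = (List.countP (fun p => p.1 == id && decide (count.getD p.2 0 ≥ k)) seen : Int) := by
  rw [← h2]
  have hfun : (fun (result : Int) u => if count.getD u 0 ≥ k then result + 1 else result)
      = (fun (result : Int) u => if (fun u => decide (count.getD u 0 ≥ k)) u = true then result + 1 else result) := by
    funext res u; simp
  rw [hfun, PySem.List.foldl_count_if (fun u => decide (count.getD u 0 ≥ k)), List.countP_map,
    List.countP_filter]
  simp only [Function.comp, zero_add, Int.natCast_inj]
  exact List.countP_congr (fun p _ => by rw [Bool.and_comm])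

-- first-occurrence dedup commutes with the (injective) pair swap
lemma foldl_add_map_swap (l : List (String × String)) :
    ∀ (s : List (String × String)),
    (l.map Prod.swap).foldl PySem.Set.add (s.map Prod.swap)
      = (l.foldl PySem.Set.add s).map Prod.swap := by
  induction l with
  | nil => intro s; rfl
  | cons x l ih =>
    intro s
    have hadd : PySem.Set.add (s.map Prod.swap) x.swap = (PySem.Set.add s x).map Prod.swap := by
      by_cases hx : x ∈ s
      · have h1 : x.swap ∈ s.map Prod.swap := List.mem_map_of_mem hx
        simp [PySem.Set.add, hx, h1]
      · have h1 : x.swap ∉ s.map Prod.swap := by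
          intro hm
          obtain ⟨y, hy, hxy⟩ := List.mem_map.mp hm
          exact hx (Prod.swap_injective hxy ▸ hy)
        simp [PySem.Set.add, hx, h1]
    simp only [List.map_cons, List.foldl_cons, hadd]
    exact ih _

lemma dedup_map_swap (l : List (String × String)) :
    PySem.List.dedup (l.map Prod.swap) = (PySem.List.dedup l).map Prod.swap := by
  simp only [PySem.List.dedup_eq_ofList, PySem.Set.ofList_eq_foldl]
  simpa using foldl_add_map_swap l []

-- B's pair-building loop yields the swapped pairs, in order, with multiplicity
lemma pairsB_eq (report : List String)
    (hpre : ∀ r ∈ report, (PySem.Str.split₀ r).length = 2) :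
    report.foldl (fun acc r =>
        acc ++ (match PySem.Str.split₀ r with | [a, b] => [(b, a)] | _ => [])) []
      = (pairsOf report).map Prod.swap := by
  rw [PySem.List.foldl_append_eq_flatMap]
  rw [pairsOf, List.map_flatMap, List.nil_append]
  apply List.flatMap_congr
  intro r hr
  obtain ⟨a, b, hs⟩ := split_two_shape r (hpre r hr)
  simp [hs]

-- sorting by the tuple key (fst, snd) is sorting by the lexicographic key
lemma sorted2_eq_sorted_toLex (xs : List (String × String)) :
    PySem.List.sorted2 xs Prod.fst Prod.snd
      = PySem.List.sorted xs (fun p => (toLex p : String ×ₗ String)) := by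
  show List.foldl (fun acc x => PySem.List.insertBy
      (fun a b => decide (a.1 < b.1) || (!decide (b.1 < a.1) && decide (a.2 < b.2))) x acc) [] xs
    = List.foldl (fun acc x => PySem.List.insertBy
      (fun a b => decide ((toLex a : String ×ₗ String) < toLex b)) x acc) [] xs
  have hfun : (fun (a b : String × String) =>
        decide (a.1 < b.1) || (!decide (b.1 < a.1) && decide (a.2 < b.2)))
      = (fun (a b : String × String) => decide ((toLex a : String ×ₗ String) < toLex b)) := by
    funext a b
    rcases lt_trichotomy a.1 b.1 with h | h | h
    · simp [Prod.Lex.lt_iff, h, asymm h]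
    · simp [Prod.Lex.lt_iff, h]
    · have h1 : ¬ a.1 < b.1 := asymm h
      have h2 : a.1 ≠ b.1 := ne_of_gt h
      simp [Prod.Lex.lt_iff, h, h1, h2]
  rw [hfun]

-- the sorted, deduplicated pair list is strictly increasing in Python's tuple order
lemma sorted2_pairwise_lexlt (xs : List (String × String)) (hnd : xs.Nodup) :
    (PySem.List.sorted2 xs Prod.fst Prod.snd).Pairwise lexlt := by
  rw [sorted2_eq_sorted_toLex]
  have h1 := PySem.List.sorted_pairwise xs (fun p => (toLex p : String ×ₗ String))
  have h2 : (PySem.List.sorted xs (fun p => (toLex p : String ×ₗ String))).Nodup :=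
    ((PySem.List.sorted_perm xs _ false).nodup_iff).mpr hnd
  refine (h1.and h2).imp ?_
  rintro a b ⟨hle, hne⟩
  have hlt : (toLex a : String ×ₗ String) < toLex b :=
    lt_of_le_of_ne hle (fun h => hne (by simpa using congrArg ofLex h))
  rcases Prod.Lex.lt_iff.mp hlt with h | h
  · exact Or.inl h
  · exact Or.inr h

-- a run of pairs with the current reportee just extends the group
lemma sweep_group (k : Int) (b : String) (G : List (String × String)) :
    ∀ (g : List String) (t : PySem.Dict String Int),
    (∀ p ∈ G, p.1 = b) →
    G.foldl (sweepStep k) (some b, g, t) = (some b, g ++ G.map Prod.snd, t) := by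
  induction G with
  | nil => intro g t _; simp
  | cons p G ih =>
    intro g t h
    have hp : p.1 = b := h p (by simp)
    have hstep : sweepStep k (some b, g, t) p = (some b, g ++ [p.2], t) := by
      simp [sweepStep, hp]
    simp only [List.foldl_cons, hstep]
    rw [ih _ _ (fun q hq => h q (by simp [hq]))]
    simp

-- the sweep over a strictly sorted pair list computes, per reporter, the number of
-- pairs whose reportee's group (= its count in the list) reaches the threshold
lemma sweep_spec (k : Int) : ∀ (n : Nat) (M : List (String × String))
    (t : PySem.Dict String Int), M.length ≤ n → M.Pairwise lexlt → ∀ x,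
    (sweepFinish k (M.foldl (sweepStep k) (none, [], t))).getD x 0
      = t.getD x 0
        + (M.countP (fun p =>
            decide ((M.countP (fun q => q.1 == p.1) : Int) ≥ k) && p.2 == x) : Int) := by
  intro n
  induction n with
  | zero =>
    intro M t hlen _ x
    have : M = [] := List.length_eq_zero_iff.mp (Nat.le_zero.mp hlen)
    subst this
    simp [sweepFinish]
  | succ n ih =>
    intro M t hlen hpw x
    rcases M with _ | ⟨⟨b, a⟩, rest⟩
    · simp [sweepFinish]
    obtain ⟨hhead, hrest⟩ := List.pairwise_cons.mp hpw
    obtain ⟨G, R, hre, hGb, hRalt⟩ :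
        ∃ G R, rest = G ++ R ∧ (∀ p ∈ G, p.1 = b) ∧
          (R = [] ∨ ∃ b' a' R', R = (b', a') :: R' ∧ b' ≠ b) := by
      refine ⟨rest.takeWhile (fun p => p.1 == b), rest.dropWhile (fun p => p.1 == b),
        List.takeWhile_append_dropWhile.symm,
        fun p hp => by simpa using List.mem_takeWhile_imp hp, ?_⟩
      have hh := List.head?_dropWhile_not (fun p => p.1 == b) rest
      cases hd : rest.dropWhile (fun p => p.1 == b) with
      | nil => exact Or.inl rfl
      | cons q R' =>
        rw [hd] at hh
        exact Or.inr ⟨q.1, q.2, R', by simp, by simpa using hh⟩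
    subst hre
    have hGfullb : ∀ p ∈ (b, a) :: G, p.1 = b := by
      intro p hp
      rcases List.mem_cons.mp hp with h | h
      · rw [h]
      · exact hGb p h
    have hfold1 : ((b, a) :: (G ++ R)).foldl (sweepStep k) (none, [], t)
        = R.foldl (sweepStep k) (some b, a :: G.map Prod.snd, t) := by
      simp only [List.foldl_cons, List.foldl_append]
      rw [show sweepStep k (none, [], t) (b, a) = (some b, [a], t) from rfl,
        sweep_group k b G [a] t hGb]
      rfl
    rcases hRalt with hR0 | ⟨b', a', R', hRc, hb'b⟩
    · -- the whole list is one group; only the final flush fires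
      subst hR0
      simp only [List.append_nil] at hfold1 hpw hlen ⊢
      rw [hfold1]
      simp only [List.foldl_nil, sweepFinish]
      have hcntb : ((b, a) :: G).countP (fun q => q.1 == b) = ((b, a) :: G).length :=
        List.countP_eq_length.mpr (fun p hp => by simp [hGfullb p hp])
      have hlen' : (a :: G.map Prod.snd).length = ((b, a) :: G).length := by simp
      have hcongr : ((b, a) :: G).countP (fun p =>
            decide ((((b, a) :: G).countP (fun q => q.1 == p.1) : Int) ≥ k) && p.2 == x)
          = ((b, a) :: G).countP (fun p =>
            decide (((((b, a) :: G).length : Nat) : Int) ≥ k) && p.2 == x) := by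
        apply List.countP_congr
        intro p hp
        have : ((b, a) :: G).countP (fun q => q.1 == p.1) = ((b, a) :: G).length := by
          rw [hGfullb p hp, hcntb]
        rw [this]
      rw [hcongr]
      by_cases hk : ((((b, a) :: G).length : Nat) : Int) ≥ k
      · rw [if_pos (by simpa [hlen'] using hk)]
        rw [PySem.Dict.getD_foldl_modify_add_one]
        congr 1
        simp only [hk, decide_true, Bool.true_and]
        rw [List.count_eq_countP]
        have : (a :: G.map Prod.snd) = ((b, a) :: G).map Prod.snd := by simp
        rw [this, List.countP_map]
        rfl
      · rw [if_neg (by simpa [hlen'] using hk)]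
        simp only [hk, decide_false, Bool.false_and]
        simp
    · -- a later group follows: the step on (b', a') flushes the current group
      subst hRc
      set g0 : List String := a :: G.map Prod.snd with hg0
      set t' : PySem.Dict String Int :=
        if (g0.length : Int) ≥ k then g0.foldl (fun d x => d.modify x 0 (· + 1)) t else t
        with ht'
      have hstep2 : sweepStep k (some b, g0, t) (b', a') = (some b', [a'], t') := by
        simp [sweepStep, hb'b, ht', ge_iff_le]
      have hfold2 : ((b, a) :: (G ++ (b', a') :: R')).foldl (sweepStep k) (none, [], t)
          = ((b', a') :: R').foldl (sweepStep k) (none, [], t') := by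
        rw [hfold1]
        simp only [List.foldl_cons, hstep2]
        rfl
      -- the tail group list is strictly sorted and shorter
      have hpwR : ((b', a') :: R').Pairwise lexlt :=
        hrest.sublist (List.sublist_append_right G _)
      have hlenR : ((b', a') :: R').length ≤ n := by
        simp only [List.length_cons, List.length_append] at hlen ⊢
        omega
      have hIH := ih ((b', a') :: R') t' hlenR hpwR x
      rw [hfold2, hIH]
      -- every pair after the current group has a reportee strictly above b
      have hbb' : b < b' := by
        have hmem : (b', a') ∈ G ++ (b', a') :: R' := by simp
        rcases hhead (b', a') hmem with h | h
        · exact h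
        · exact absurd h.1.symm hb'b
      have hRb : ∀ p ∈ (b', a') :: R', p.1 ≠ b := by
        intro p hp
        rcases List.mem_cons.mp hp with h | h
        · rw [h]; exact hb'b
        · rcases (List.pairwise_cons.mp hpwR).1 p h with hlt | heq
          · intro hpb; rw [hpb] at hlt; exact absurd (hbb'.trans hlt) (lt_irrefl b)
          · intro hpb; rw [hpb] at heq; exact hb'b heq.1
      -- split the count over the current group and the rest
      have hMeq : (b, a) :: (G ++ (b', a') :: R') = ((b, a) :: G) ++ ((b', a') :: R') := by
        simp
      rw [hMeq]
      have hcntbM : (((b, a) :: G) ++ ((b', a') :: R')).countP (fun q => q.1 == b)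
          = ((b, a) :: G).length := by
        rw [List.countP_append,
          List.countP_eq_length.mpr (fun p hp => by simp [hGfullb p hp]),
          List.countP_eq_zero.mpr (fun p hp => by simp [hRb p hp])]
        omega
      have hinner_ne : ∀ y, y ≠ b →
          (((b, a) :: G) ++ ((b', a') :: R')).countP (fun q => q.1 == y)
            = ((b', a') :: R').countP (fun q => q.1 == y) := by
        intro y hy
        rw [List.countP_append,
          List.countP_eq_zero.mpr (fun p hp => by
            simp only [beq_iff_eq, hGfullb p hp]; exact Ne.symm hy)]
        simp
      have hsplit : (((b, a) :: G) ++ ((b', a') :: R')).countP (fun p =>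
            decide (((((b, a) :: G) ++ ((b', a') :: R')).countP (fun q => q.1 == p.1) : Int) ≥ k)
              && p.2 == x)
          = ((b, a) :: G).countP (fun p =>
              decide (((((b, a) :: G).length : Nat) : Int) ≥ k) && p.2 == x)
            + ((b', a') :: R').countP (fun p =>
              decide ((((b', a') :: R').countP (fun q => q.1 == p.1) : Int) ≥ k) && p.2 == x) := by
        rw [List.countP_append]
        congr 1
        · apply List.countP_congr
          intro p hp
          rw [hGfullb p hp, hcntbM]
        · apply List.countP_congr
          intro p hp
          rw [hinner_ne p.1 (hRb p hp)]
      rw [hsplit]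
      -- the flushed group contributes its per-reporter count when it meets k
      have hg0len : (g0.length : Nat) = ((b, a) :: G).length := by simp [hg0]
      have hg0cnt : (g0.count x : Nat) = ((b, a) :: G).countP (fun p => p.2 == x) := by
        have hmap : g0 = ((b, a) :: G).map Prod.snd := by simp [hg0]
        rw [List.count_eq_countP, hmap, List.countP_map]
        rfl
      by_cases hk : ((((b, a) :: G).length : Nat) : Int) ≥ k
      · have ht'x : t'.getD x 0 = t.getD x 0 + (g0.count x : Int) := by
          rw [ht', if_pos (by rw [hg0len]; exact hk), PySem.Dict.getD_foldl_modify_add_one]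
        rw [ht'x]
        have hgc : ((b, a) :: G).countP (fun p =>
            decide (((((b, a) :: G).length : Nat) : Int) ≥ k) && p.2 == x)
            = ((b, a) :: G).countP (fun p => p.2 == x) := by
          apply List.countP_congr
          intro p _
          rw [decide_eq_true hk]
          simp
        rw [hgc]
        push_cast [← hg0cnt]
        ring
      · have ht'x : t'.getD x 0 = t.getD x 0 := by
          rw [ht', if_neg (by rw [hg0len]; exact hk)]
        rw [ht'x]
        have hgc : ((b, a) :: G).countP (fun p =>
            decide (((((b, a) :: G).length : Nat) : Int) ≥ k) && p.2 == x) = 0 := by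
          apply List.countP_eq_zero.mpr
          intro p _
          rw [decide_eq_false hk]
          simp
        rw [hgc]
        push_cast
        ring

-- ===== VERDICT (by name: the statement is the Claim_ definition above) =====
theorem solution_spec : Claim_equal_solution := by
  intro id_list report k _hdom hpre
  unfold Spec_solution solution solution_alt
  obtain ⟨hcnt, h2⟩ := loop_rel report PySem.Dict.empty PySem.Dict.empty []
    hpre (by simp [PySem.Dict.getD_empty])
  set stA := report.foldl stepA (PySem.Dict.empty, PySem.Dict.empty) with hA
  set stG := report.foldl stepG (([] : PySem.Set (String × String)), PySem.Dict.empty) with hGdef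
  have hgcnt : ∀ u, stG.2.getD u 0 = (stG.1.countP (fun p => p.2 == u) : Int) :=
    ghost_count report [] PySem.Dict.empty hpre (by simp [PySem.Dict.getD_empty])
  have hseen : stG.1 = PySem.List.dedup (pairsOf report) := by
    rw [hGdef, ghost_seen report [] PySem.Dict.empty hpre, PySem.Set.update_nil_left,
      PySem.List.dedup_eq_ofList]
  have hndG : stG.1.Nodup := by rw [hseen]; exact PySem.List.nodup_dedup _
  have hnds : (stG.1.map Prod.swap).Nodup := hndG.map Prod.swap_injective
  have hpairs : report.foldl (fun acc r =>
        acc ++ (match PySem.Str.split₀ r with | [a, b] => [(b, a)] | _ => [])) []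
      = (pairsOf report).map Prod.swap := pairsB_eq report hpre
  have hdedup : PySem.List.dedup ((pairsOf report).map Prod.swap) = stG.1.map Prod.swap := by
    rw [dedup_map_swap, ← hseen]
  set M := PySem.List.sorted2 (stG.1.map Prod.swap) Prod.fst Prod.snd with hMdef
  have hperm : M.Perm (stG.1.map Prod.swap) := by
    rw [hMdef, sorted2_eq_sorted_toLex]
    exact PySem.List.sorted_perm _ _ false
  have hpwM : M.Pairwise lexlt := sorted2_pairwise_lexlt _ hnds
  simp only [hpairs, hdedup, ← hMdef]
  apply List.map_congr_left
  intro id _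
  rw [A_entry stA.1 stA.2 stG.1 k id (h2 id)]
  rw [sweep_spec k M.length M PySem.Dict.empty le_rfl hpwM id, PySem.Dict.getD_empty, zero_add]
  have hinner : ∀ y, (M.countP (fun q => q.1 == y)) = stG.1.countP (fun s => s.2 == y) := by
    intro y
    rw [hperm.countP_eq, List.countP_map]
    rfl
  simp only [hinner]
  rw [hperm.countP_eq, List.countP_map]
  congr 1
  apply List.countP_congr
  intro p _
  have hval : stA.2.getD p.2 0 = (stG.1.countP (fun s => s.2 == p.2) : Int) := by
    rw [← hcnt]; exact hgcnt p.2
  simp only [Function.comp, hval, Prod.fst_swap, Prod.snd_swap, Bool.and_comm]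
  rfl
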